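-- pv_equiv track=rewrite | github.com/OrcasJi/AI-shopping-assistant | utils/style_data_prep.py | tag_with_lexicon
-- ===== SOURCE A (Python) =====
-- from typing import List, Dict, Tuple
--
-- def tag_with_lexicon(tokens: List[str], style_terms: List[str]) -> List[str]:
--     """用词表对 tokens 打 BIO（B-STYLE/I-STYLE）标签；优先匹配多词短语。"""
--     labels = ["O"] * len(tokens)
--     norm_terms = sorted([t.strip().lower() for t in style_terms if t and t.strip()],
--                         key=lambda x: -len(x.split()))
--     low_tokens = [t.lower() for t in tokens]
--     i = 0
--     while i < len(tokens):
--         matched = False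
--         for term in norm_terms:
--             parts = term.split()
--             L = len(parts)
--             if L == 0 or i + L > len(tokens):
--                 continue
--             if low_tokens[i:i+L] == parts:
--                 labels[i] = "B-STYLE"
--                 for j in range(1, L):
--                     labels[i + j] = "I-STYLE"
--                 i += L
--                 matched = True
--                 break
--         if not matched:
--             i += 1
--     return labels
-- ===== SOURCE B (Python) =====
-- def tag_with_lexicon(tokens, style_terms):
--     """BIO-tag tokens via a style lexicon; at each position try the longest
--     possible phrase first, testing slices by set membership (no scan over terms)."""
--     phrases = {tuple(t.strip().lower().split())
--                for t in style_terms if t and t.strip()}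
--     max_len = max((len(p) for p in phrases), default=0)
--     low = [t.lower() for t in tokens]
--     n = len(tokens)
--     labels = []
--     i = 0
--     while i < n:
--         for L in range(max_len, 0, -1):
--             if i + L <= n and tuple(low[i:i + L]) in phrases:
--                 labels.append("B-STYLE")
--                 labels.extend(["I-STYLE"] * (L - 1))
--                 i += L
--                 break
--         else:
--             labels.append("O")
--             i += 1
--     return labels
-- ===== Notes on version B (the rewrite author's own statement) =====
-- stated objective: faster
-- what changed: Instead of scanning the whole length-sorted lexicon at every token position, B builds one hash set of normalized phrase tuples and at each position probes slices longest-first by set membership.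
import Mathlib
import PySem

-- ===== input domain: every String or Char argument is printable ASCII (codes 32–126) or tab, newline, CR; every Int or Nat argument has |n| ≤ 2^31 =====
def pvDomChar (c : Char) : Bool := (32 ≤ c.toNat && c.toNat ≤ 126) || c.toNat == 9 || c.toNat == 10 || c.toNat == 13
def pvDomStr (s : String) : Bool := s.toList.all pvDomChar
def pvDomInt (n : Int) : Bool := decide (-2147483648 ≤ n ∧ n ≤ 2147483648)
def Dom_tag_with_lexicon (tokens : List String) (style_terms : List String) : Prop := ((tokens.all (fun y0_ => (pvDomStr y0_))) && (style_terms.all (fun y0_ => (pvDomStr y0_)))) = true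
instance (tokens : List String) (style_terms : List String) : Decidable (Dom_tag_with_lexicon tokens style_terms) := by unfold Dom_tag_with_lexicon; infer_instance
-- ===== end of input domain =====

-- B replaces A's per-position scan over the whole sorted lexicon by a set of normalized
-- phrases tried longest-length-first (objective: faster — O(n·Lmax) positions·lengths
-- instead of O(n·m) positions·terms).

-- ===== PORT A =====

-- norm_terms = sorted([t.strip().lower() for t in style_terms if t and t.strip()], key=lambda x: -len(x.split()))
def pvNormA (style_terms : List String) : List String :=
  PySem.List.sorted
    ((style_terms.filter (fun t => t != "" && PySem.Str.strip t != "")).map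
      (fun t => PySem.Str.lower (PySem.Str.strip t)))
    (fun x => -((PySem.Str.split₀ x).length : Int)) false

-- the inner `for term in norm_terms` scan; returns the matched phrase length L (Python's break)
def pvScanA (low : List String) (n i : Nat) : List String → Option Nat
  | [] => none
  | term :: rest =>
    let parts := PySem.Str.split₀ term
    let L := parts.length
    if L = 0 ∨ n < i + L then pvScanA low n i rest
    else if PySem.List.slice low (some (i : Int)) (some ((i + L : Nat) : Int)) = parts then some L
    else pvScanA low n i rest

-- a match advances i by at least 1 (needed by pvLoopA's termination)
lemma pvScanA_pos (low : List String) (n i : Nat) (ts : List String) (L : Nat)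
    (h : pvScanA low n i ts = some L) : 1 ≤ L ∧ i + L ≤ n := by
  induction ts with
  | nil => simp [pvScanA] at h
  | cons t rest ih =>
    simp only [pvScanA] at h
    split at h
    · exact ih h
    · split at h
      · rename_i hguard _
        cases h
        constructor <;> omega
      · exact ih h

-- labels[i] = "B-STYLE"; for j in range(1, L): labels[i+j] = "I-STYLE"
def pvWriteI (labels : List String) (i L : Nat) : List String :=
  (PySem.List.pyRange 1 (L : Int) 1).foldl
    (fun lb j => lb.set (i + j.toNat) "I-STYLE") (labels.set i "B-STYLE")

-- the `while i < len(tokens)` loop over the mutable labels list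
def pvLoopA (norm low : List String) (n : Nat) (labels : List String) (i : Nat) : List String :=
  if _h : i < n then
    match hs : pvScanA low n i norm with
    | some L => pvLoopA norm low n (pvWriteI labels i L) (i + L)
    | none => pvLoopA norm low n labels (i + 1)
  else labels
termination_by n - i
decreasing_by
  · have := pvScanA_pos low n i norm _ hs; omega
  · omega

def tag_with_lexicon (tokens : List String) (style_terms : List String) : List String :=
  pvLoopA (pvNormA style_terms) (tokens.map (fun t => PySem.Str.lower t)) tokens.length
    (List.replicate tokens.length "O") 0

-- ===== PORT B =====

-- phrases = {tuple(t.strip().lower().split()) for t in style_terms if t and t.strip()}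
def pvPhrases (style_terms : List String) : PySem.Set (List String) :=
  PySem.Set.ofList
    ((style_terms.filter (fun t => t != "" && PySem.Str.strip t != "")).map
      (fun t => PySem.Str.split₀ (PySem.Str.lower (PySem.Str.strip t))))

-- `for L in range(max_len, 0, -1): if i+L <= n and tuple(low[i:i+L]) in phrases: break`
def pvScanB (low : List String) (S : PySem.Set (List String)) (n i : Nat) : Nat → Option Nat
  | 0 => none
  | L + 1 =>
    if i + (L + 1) ≤ n ∧ PySem.List.slice low (some (i : Int)) (some ((i + (L + 1) : Nat) : Int)) ∈ S
    then some (L + 1) else pvScanB low S n i L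

lemma pvScanB_pos (low : List String) (S : PySem.Set (List String)) (n i M L : Nat)
    (h : pvScanB low S n i M = some L) : 1 ≤ L ∧ i + L ≤ n := by
  induction M with
  | zero => simp [pvScanB] at h
  | succ m ih =>
    simp only [pvScanB] at h
    split at h
    · rename_i hc
      cases h
      exact ⟨by omega, hc.1⟩
    · exact ih h

-- the `while i < n` loop building labels by appending
def pvLoopB (low : List String) (S : PySem.Set (List String)) (maxL n : Nat)
    (labels : List String) (i : Nat) : List String :=
  if i < n then
    match hs : pvScanB low S n i maxL with
    | some L => pvLoopB low S maxL n (labels ++ "B-STYLE" :: List.replicate (L - 1) "I-STYLE") (i + L)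
    | none => pvLoopB low S maxL n (labels ++ ["O"]) (i + 1)
  else labels
termination_by n - i
decreasing_by
  · have := pvScanB_pos low S n i maxL _ hs; omega
  · omega

def tag_with_lexicon_alt (tokens : List String) (style_terms : List String) : List String :=
  let S := pvPhrases style_terms
  pvLoopB (tokens.map (fun t => PySem.Str.lower t)) S
    (PySem.List.maxD (S.map (fun p => p.length)) (fun x => x) 0) tokens.length [] 0

-- ===== PRECONDITION & SPEC =====
def Spec_tag_with_lexicon (tokens : List String) (style_terms : List String) (out : List String) : Prop := out = tag_with_lexicon_alt tokens style_terms
instance (tokens : List String) (style_terms : List String) (out : List String) : Decidable (Spec_tag_with_lexicon tokens style_terms out) := by unfold Spec_tag_with_lexicon; infer_instance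

-- ===== CLAIM (what is proved, stated in full; the proofs are below) =====
def Claim_equal_tag_with_lexicon : Prop := ∀ (tokens : List String) (style_terms : List String), Dom_tag_with_lexicon tokens style_terms → Spec_tag_with_lexicon tokens style_terms (tag_with_lexicon tokens style_terms)

-- ===== LEMMAS AND PROOFS =====

-- the slice both scans take: low[i:i+L]
def pvSlice (low : List String) (i L : Nat) : List String := (low.drop i).take L

lemma pvSlice_eq (low : List String) (i L : Nat) :
    PySem.List.slice low (some (i : Int)) (some ((i + L : Nat) : Int)) = pvSlice low i L := by
  rw [PySem.List.slice_natCast]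
  simp [pvSlice]

lemma pvSlice_length (low : List String) (i L : Nat) (h : i + L ≤ low.length) :
    (pvSlice low i L).length = L := by
  simp [pvSlice]
  omega

-- "some phrase of length L matches at i": the shared match predicate
def pvM (low : List String) (phr : List (List String)) (n i L : Nat) : Prop :=
  1 ≤ L ∧ i + L ≤ n ∧ pvSlice low i L ∈ phr

lemma pvScanA_none (low : List String) (i : Nat) (ts : List String)
    (h : pvScanA low low.length i ts = none) :
    ∀ L, ¬ pvM low (ts.map PySem.Str.split₀) low.length i L := by
  induction ts with
  | nil => intro L hM; simp [pvM] at hM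
  | cons t rest ih =>
    simp only [pvScanA] at h
    intro L hM
    obtain ⟨h1, h2, h3⟩ := hM
    rcases List.mem_cons.mp h3 with hhd | htl
    · -- the head phrase matches: length forces L = parts.length
      have hlen : L = (PySem.Str.split₀ t).length := by
        rw [← hhd, pvSlice_length low i L h2]
      split at h
      · rename_i hguard; omega
      · split at h
        · cases h
        · rename_i hne
          rw [pvSlice_eq, ← hlen] at hne
          exact hne hhd
    · -- a tail phrase matches: reuse the recursive scan
      have hrest : pvScanA low low.length i rest = none := by
        split at h
        · exact h
        · split at h
          · cases h
          · exact h
      exact ih hrest L ⟨h1, h2, htl⟩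

lemma pvScanA_some (low : List String) (i : Nat) (ts : List String) (L : Nat)
    (hpw : ts.Pairwise (fun a b => (PySem.Str.split₀ b).length ≤ (PySem.Str.split₀ a).length))
    (h : pvScanA low low.length i ts = some L) :
    pvM low (ts.map PySem.Str.split₀) low.length i L ∧
      ∀ L', pvM low (ts.map PySem.Str.split₀) low.length i L' → L' ≤ L := by
  induction ts with
  | nil => simp [pvScanA] at h
  | cons t rest ih =>
    rcases List.pairwise_cons.mp hpw with ⟨hhd, htail⟩
    simp only [pvScanA] at h
    -- helper: a match by the head phrase has length (split₀ t).length
    have hheadlen : ∀ L', pvM low (List.map PySem.Str.split₀ (t :: rest)) low.length i L' →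
        pvSlice low i L' = PySem.Str.split₀ t → L' = (PySem.Str.split₀ t).length := by
      intro L' hM' hEq
      rw [← hEq, pvSlice_length low i L' hM'.2.1]
    split at h
    · -- guard skips the head; head cannot match
      rename_i hguard
      have := ih htail h
      refine ⟨⟨this.1.1, this.1.2.1, List.mem_cons_of_mem _ this.1.2.2⟩, ?_⟩
      intro L' hM'
      rcases List.mem_cons.mp hM'.2.2 with hhd' | htl'
      · have := hheadlen L' hM' hhd'
        obtain ⟨h1, h2, _⟩ := hM'
        omega
      · exact this.2 L' ⟨hM'.1, hM'.2.1, htl'⟩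
    · split at h
      · -- head matches: L = parts.length, and it is maximal
        rename_i hguard hsl
        cases h
        rw [pvSlice_eq] at hsl
        have hmem : pvSlice low i (PySem.Str.split₀ t).length
            ∈ List.map PySem.Str.split₀ (t :: rest) := by
          rw [hsl]; simp
        refine ⟨⟨by omega, by omega, hmem⟩, ?_⟩
        intro L' hM'
        rcases List.mem_cons.mp hM'.2.2 with hhd' | htl'
        · have := hheadlen L' hM' hhd'; omega
        · obtain ⟨t', ht', hsp⟩ := List.mem_map.mp htl'
          have : L' = (PySem.Str.split₀ t').length := by
            rw [hsp, pvSlice_length low i L' hM'.2.1]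
          have := hhd t' ht'
          omega
      · -- head does not match
        rename_i hguard hne
        have := ih htail h
        refine ⟨⟨this.1.1, this.1.2.1, List.mem_cons_of_mem _ this.1.2.2⟩, ?_⟩
        intro L' hM'
        rcases List.mem_cons.mp hM'.2.2 with hhd' | htl'
        · have hL' := hheadlen L' hM' hhd'
          rw [pvSlice_eq] at hne
          rw [hL'] at hhd'
          exact absurd hhd' hne
        · exact this.2 L' ⟨hM'.1, hM'.2.1, htl'⟩

lemma pvScanB_none (low : List String) (S : PySem.Set (List String)) (i M : Nat)
    (h : pvScanB low S low.length i M = none) :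
    ∀ L, L ≤ M → ¬ pvM low S low.length i L := by
  induction M with
  | zero => intro L hL hM; have := hM.1; omega
  | succ m ih =>
    simp only [pvScanB] at h
    split at h
    · cases h
    · rename_i hc
      rw [pvSlice_eq] at hc
      intro L hL hM
      rcases Nat.lt_or_ge L (m + 1) with hlt | hge
      · exact ih h L (by omega) hM
      · have : L = m + 1 := by omega
        subst this
        exact hc ⟨hM.2.1, hM.2.2⟩

lemma pvScanB_some (low : List String) (S : PySem.Set (List String)) (i M L : Nat)
    (h : pvScanB low S low.length i M = some L) :
    pvM low S low.length i L ∧ ∀ L', L < L' → L' ≤ M → ¬ pvM low S low.length i L' := by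
  induction M with
  | zero => simp [pvScanB] at h
  | succ m ih =>
    simp only [pvScanB] at h
    split at h
    · rename_i hc
      cases h
      rw [pvSlice_eq] at hc
      exact ⟨⟨by omega, hc.1, hc.2⟩, fun L' h1 h2 _ => by omega⟩
    · rename_i hc
      rw [pvSlice_eq] at hc
      obtain ⟨hM, hmax⟩ := ih h
      refine ⟨hM, fun L' h1 h2 hM' => ?_⟩
      rcases Nat.lt_or_ge L' (m + 1) with hlt | hge
      · exact hmax L' h1 (by omega) hM'
      · have : L' = m + 1 := by omega
        subst this
        exact hc ⟨hM'.2.1, hM'.2.2⟩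

-- the phrase set and A's mapped lexicon have the same members
lemma pvMem_S (style_terms : List String) (p : List String) :
    p ∈ pvPhrases style_terms ↔ p ∈ (pvNormA style_terms).map PySem.Str.split₀ := by
  simp only [pvPhrases, pvNormA, PySem.Set.mem_ofList, List.mem_map, PySem.List.mem_sorted]
  constructor
  · rintro ⟨a, ha, rfl⟩
    exact ⟨_, ⟨a, ha, rfl⟩, rfl⟩
  · rintro ⟨a, ⟨a1, ha1, rfl⟩, rfl⟩
    exact ⟨a1, ha1, rfl⟩

-- any matching length is bounded by max_len
lemma pvLe_maxD (S : List (List String)) (p : List String) (hp : p ∈ S) :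
    p.length ≤ PySem.List.maxD (S.map (fun q => q.length)) (fun x => x) 0 := by
  have hmem : p.length ∈ S.map (fun q => q.length) := List.mem_map.mpr ⟨p, hp, rfl⟩
  unfold PySem.List.maxD
  cases hmax : PySem.List.max? (S.map (fun q => q.length)) (fun x => x) with
  | none =>
    rw [PySem.List.max?_eq_none_iff] at hmax
    rw [hmax] at hmem
    simp at hmem
  | some m =>
    simpa using PySem.List.max?_isMax hmax _ hmem

-- A's pairwise order on the sorted lexicon, in length form
lemma pvNormA_pairwise (style_terms : List String) :
    (pvNormA style_terms).Pairwise
      (fun a b => (PySem.Str.split₀ b).length ≤ (PySem.Str.split₀ a).length) := by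
  have := PySem.List.sorted_pairwise
    ((style_terms.filter (fun t => t != "" && PySem.Str.strip t != "")).map
      (fun t => PySem.Str.lower (PySem.Str.strip t)))
    (fun x => -((PySem.Str.split₀ x).length : Int))
  exact this.imp (fun {a b} hab => by omega)

-- the two inner scans agree
lemma pvScan_eq (low : List String) (style_terms : List String) (i : Nat) :
    pvScanA low low.length i (pvNormA style_terms) =
      pvScanB low (pvPhrases style_terms) low.length i
        (PySem.List.maxD ((pvPhrases style_terms).map (fun p => p.length)) (fun x => x) 0) := by
  set S := pvPhrases style_terms with hS
  set M0 := PySem.List.maxD (S.map (fun p => p.length)) (fun x => x) 0 with hM0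
  set norm := pvNormA style_terms with hnorm
  have hMequiv : ∀ L, pvM low (norm.map PySem.Str.split₀) low.length i L ↔
      pvM low S low.length i L := by
    intro L
    unfold pvM
    rw [pvMem_S]
  have hbound : ∀ L, pvM low S low.length i L → L ≤ M0 := by
    intro L hM
    have hlen : (pvSlice low i L).length = L := pvSlice_length low i L hM.2.1
    have := pvLe_maxD S _ hM.2.2
    omega
  cases hA : pvScanA low low.length i norm with
  | some L =>
    obtain ⟨hM, hmax⟩ := pvScanA_some low i norm L (pvNormA_pairwise style_terms) hA
    cases hB : pvScanB low S low.length i M0 with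
    | none =>
      exact absurd ((hMequiv L).mp hM)
        (pvScanB_none low S i M0 hB L (hbound L ((hMequiv L).mp hM)))
    | some L' =>
      obtain ⟨hM', hmax'⟩ := pvScanB_some low S i M0 L' hB
      have h1 : L' ≤ L := hmax L' ((hMequiv L').mpr hM')
      have h2 : ¬ L' < L := fun hlt =>
        hmax' L hlt (hbound L ((hMequiv L).mp hM)) ((hMequiv L).mp hM)
      have : L = L' := by omega
      rw [this]
  | none =>
    cases hB : pvScanB low S low.length i M0 with
    | none => rfl
    | some L' =>
      obtain ⟨hM', _⟩ := pvScanB_some low S i M0 L' hB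
      exact absurd ((hMequiv L').mpr hM') (pvScanA_none low i norm hA L')

-- unfoldings of the two loops (split on the named-match equation)
lemma pvLoopA_stop (norm low : List String) (n : Nat) (labels : List String) (i : Nat)
    (h : ¬ i < n) : pvLoopA norm low n labels i = labels := by
  rw [pvLoopA]; simp [h]

lemma pvLoopA_step_some (norm low : List String) (n : Nat) (labels : List String) (i L : Nat)
    (h : i < n) (hs : pvScanA low n i norm = some L) :
    pvLoopA norm low n labels i = pvLoopA norm low n (pvWriteI labels i L) (i + L) := by
  rw [pvLoopA]
  simp only [dif_pos h]
  split
  · rename_i L' heq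
    rw [hs] at heq
    simp only [Option.some.injEq] at heq
    rw [heq]
  · rename_i heq
    rw [hs] at heq
    cases heq

lemma pvLoopA_step_none (norm low : List String) (n : Nat) (labels : List String) (i : Nat)
    (h : i < n) (hs : pvScanA low n i norm = none) :
    pvLoopA norm low n labels i = pvLoopA norm low n labels (i + 1) := by
  rw [pvLoopA]
  simp only [dif_pos h]
  split
  · rename_i L' heq
    rw [hs] at heq
    cases heq
  · rfl

lemma pvLoopB_stop (low : List String) (S : PySem.Set (List String)) (M n : Nat)
    (labels : List String) (i : Nat) (h : ¬ i < n) : pvLoopB low S M n labels i = labels := by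
  rw [pvLoopB]; simp [h]

lemma pvLoopB_step_some (low : List String) (S : PySem.Set (List String)) (M n : Nat)
    (labels : List String) (i L : Nat) (h : i < n) (hs : pvScanB low S n i M = some L) :
    pvLoopB low S M n labels i
      = pvLoopB low S M n (labels ++ "B-STYLE" :: List.replicate (L - 1) "I-STYLE") (i + L) := by
  rw [pvLoopB]
  simp only [if_pos h]
  split
  · rename_i L' heq
    rw [hs] at heq
    simp only [Option.some.injEq] at heq
    rw [heq]
  · rename_i heq
    rw [hs] at heq
    cases heq

lemma pvLoopB_step_none (low : List String) (S : PySem.Set (List String)) (M n : Nat)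
    (labels : List String) (i : Nat) (h : i < n) (hs : pvScanB low S n i M = none) :
    pvLoopB low S M n labels i = pvLoopB low S M n (labels ++ ["O"]) (i + 1) := by
  rw [pvLoopB]
  simp only [if_pos h]
  split
  · rename_i L' heq
    rw [hs] at heq
    cases heq
  · rfl

-- B's loop accumulates by appending
lemma pvLoopB_acc (low : List String) (S : PySem.Set (List String)) (M n : Nat) :
    ∀ k i acc, n - i ≤ k →
      pvLoopB low S M n acc i = acc ++ pvLoopB low S M n [] i := by
  intro k
  induction k with
  | zero =>
    intro i acc hk
    have h : ¬ i < n := by omega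
    rw [pvLoopB_stop low S M n acc i h, pvLoopB_stop low S M n [] i h]
    simp
  | succ m ih =>
    intro i acc hk
    by_cases hi : i < n
    · cases hs : pvScanB low S n i M with
      | some L =>
        have hpos := pvScanB_pos low S n i M L hs
        rw [pvLoopB_step_some low S M n acc i L hi hs,
            pvLoopB_step_some low S M n [] i L hi hs]
        rw [ih (i + L) _ (by omega), ih (i + L) ([] ++ "B-STYLE" :: List.replicate (L - 1) "I-STYLE") (by omega)]
        simp
      | none =>
        rw [pvLoopB_step_none low S M n acc i hi hs,
            pvLoopB_step_none low S M n [] i hi hs]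
        rw [ih (i + 1) _ (by omega), ih (i + 1) ([] ++ ["O"]) (by omega)]
        simp
    · rw [pvLoopB_stop low S M n acc i hi, pvLoopB_stop low S M n [] i hi]
      simp

-- A's in-place writes over a run produce a contiguous replicate segment
lemma pvSetRun (i L : Nat) :
    ∀ (d a : Nat) (lb : List String), a + d = L → 1 ≤ a → i + L ≤ lb.length →
      (PySem.List.pyRange (a : Int) (L : Int) 1).foldl
          (fun lb j => lb.set (i + j.toNat) "I-STYLE") lb
        = lb.take (i + a) ++ List.replicate d "I-STYLE" ++ lb.drop (i + L) := by
  intro d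
  induction d with
  | zero =>
    intro a lb ha h1 h2
    have : a = L := by omega
    subst this
    rw [PySem.List.pyRange_one_eq_nil le_rfl]
    simp [List.take_append_drop]
  | succ m ih =>
    intro a lb ha h1 h2
    have hlt : (a : Int) < (L : Int) := by exact_mod_cast (by omega : a < L)
    rw [PySem.List.pyRange_one_cons hlt]
    simp only [List.foldl_cons]
    have hcast : ((a : Int) + 1) = ((a + 1 : Nat) : Int) := by push_cast; ring
    rw [hcast]
    have hia : i + a < lb.length := by omega
    have hset : lb.set (i + (a : Int).toNat) "I-STYLE"
        = lb.take (i + a) ++ "I-STYLE" :: lb.drop (i + a + 1) := by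
      rw [Int.toNat_natCast, List.set_eq_take_append_cons_drop]
      simp [hia]
    rw [hset]
    have hlen : (lb.take (i + a)).length = i + a := by
      rw [List.length_take]; omega
    have hlb1 : i + L ≤ (lb.take (i + a) ++ "I-STYLE" :: lb.drop (i + a + 1)).length := by
      simp only [List.length_append, List.length_cons, List.length_drop, hlen]
      omega
    rw [ih (a + 1) _ (by omega) (by omega) hlb1]
    have htake : (lb.take (i + a) ++ "I-STYLE" :: lb.drop (i + a + 1)).take (i + (a + 1))
        = lb.take (i + a) ++ ["I-STYLE"] := by
      rw [List.take_append,
          List.take_of_length_le (i := i + (a + 1)) (l := lb.take (i + a)) (by rw [hlen]; omega),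
          hlen]
      have h3 : i + (a + 1) - (i + a) = 1 := by omega
      rw [h3]
      simp
    have hdrop : (lb.take (i + a) ++ "I-STYLE" :: lb.drop (i + a + 1)).drop (i + L)
        = lb.drop (i + L) := by
      rw [List.drop_append,
          List.drop_of_length_le (i := i + L) (l := lb.take (i + a)) (by rw [hlen]; omega),
          hlen]
      have h3 : i + L - (i + a) = (L - a - 1) + 1 := by omega
      rw [h3]
      simp only [List.drop_succ_cons, List.drop_drop, List.nil_append]
      congr 1
      omega
    rw [htake, hdrop]
    simp [List.replicate_succ]

lemma pvWriteI_eq (labels : List String) (i L : Nat) (h1 : 1 ≤ L) (h2 : i + L ≤ labels.length) :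
    pvWriteI labels i L
      = labels.take i ++ "B-STYLE" :: (List.replicate (L - 1) "I-STYLE" ++ labels.drop (i + L)) := by
  unfold pvWriteI
  have hset : labels.set i "B-STYLE" = labels.take i ++ "B-STYLE" :: labels.drop (i + 1) := by
    rw [List.set_eq_take_append_cons_drop]
    have : i < labels.length := by omega
    simp [this]
  have hlenset : i + L ≤ (labels.set i "B-STYLE").length := by
    rw [List.length_set]; omega
  have hrun := pvSetRun i L (L - 1) 1 (labels.set i "B-STYLE") (by omega) le_rfl hlenset
  simp only [Nat.cast_one] at hrun
  rw [hrun, hset]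
  have hlen : (labels.take i).length = i := by rw [List.length_take]; omega
  have htake : (labels.take i ++ "B-STYLE" :: labels.drop (i + 1)).take (i + 1)
      = labels.take i ++ ["B-STYLE"] := by
    rw [List.take_append,
        List.take_of_length_le (i := i + 1) (l := labels.take i) (by rw [hlen]; omega),
        hlen]
    have h3 : i + 1 - i = 1 := by omega
    rw [h3]
    simp
  have hdrop : (labels.take i ++ "B-STYLE" :: labels.drop (i + 1)).drop (i + L)
      = labels.drop (i + L) := by
    rw [List.drop_append,
        List.drop_of_length_le (i := i + L) (l := labels.take i) (by rw [hlen]; omega),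
        hlen]
    have h3 : i + L - i = (L - 1) + 1 := by omega
    rw [h3]
    simp only [List.drop_succ_cons, List.drop_drop, List.nil_append]
    congr 1
    omega
  rw [htake, hdrop]
  simp

-- main loop correspondence: A's mutation of a run of "O"s equals B's appends
lemma pvLoopA_eq (norm low : List String) (S : PySem.Set (List String)) (M : Nat)
    (hscan : ∀ i, pvScanA low low.length i norm = pvScanB low S low.length i M) :
    ∀ k i labels, low.length - i ≤ k → labels.length = low.length →
      labels.drop i = List.replicate (low.length - i) "O" →
      pvLoopA norm low low.length labels i
        = labels.take i ++ pvLoopB low S M low.length [] i := by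
  intro k
  induction k with
  | zero =>
    intro i labels hk hlen hdrop
    have h : ¬ i < low.length := by omega
    rw [pvLoopA_stop norm low low.length labels i h,
        pvLoopB_stop low S M low.length [] i h,
        List.take_of_length_le (by omega)]
    simp
  | succ m ih =>
    intro i labels hk hlen hdrop
    by_cases hi : i < low.length
    · have hgeti : labels[i]? = some "O" := by
        have h0 : (labels.drop i)[0]? = labels[i + 0]? := List.getElem?_drop
        rw [hdrop] at h0
        simp only [Nat.add_zero] at h0
        rw [← h0, List.getElem?_replicate]
        simp only [if_pos (by omega : 0 < low.length - i)]
      cases hs : pvScanB low S low.length i M with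
      | none =>
        have hsA : pvScanA low low.length i norm = none := by rw [hscan i, hs]
        rw [pvLoopA_step_none norm low low.length labels i hi hsA,
            pvLoopB_step_none low S M low.length [] i hi hs]
        have hdrop' : labels.drop (i + 1) = List.replicate (low.length - (i + 1)) "O" := by
          have hdd : labels.drop (i + 1) = (labels.drop i).drop 1 := by
            rw [List.drop_drop]
          rw [hdd, hdrop, List.drop_replicate]
          congr 1
        rw [ih (i + 1) labels (by omega) hlen hdrop']
        have hacc := pvLoopB_acc low S M low.length (low.length - (i + 1)) (i + 1)
          ([] ++ ["O"]) le_rfl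
        rw [hacc]
        have htake : labels.take (i + 1) = labels.take i ++ ["O"] := by
          rw [List.take_add_one, hgeti]
          rfl
        rw [htake]
        simp
      | some L =>
        have hsA : pvScanA low low.length i norm = some L := by rw [hscan i, hs]
        have hpos := pvScanB_pos low S low.length i M L hs
        rw [pvLoopA_step_some norm low low.length labels i L hi hsA,
            pvLoopB_step_some low S M low.length [] i L hi hs]
        have hw := pvWriteI_eq labels i L (by omega) (by omega)
        have hpre : (labels.take i ++ "B-STYLE" :: List.replicate (L - 1) "I-STYLE").length
            = i + L := by
          simp only [List.length_append, List.length_cons, List.length_replicate,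
            List.length_take]
          omega
        have hw' : pvWriteI labels i L
            = (labels.take i ++ "B-STYLE" :: List.replicate (L - 1) "I-STYLE")
              ++ labels.drop (i + L) := by
          rw [hw]; simp
        have hlen' : (pvWriteI labels i L).length = low.length := by
          rw [hw', List.length_append, hpre, List.length_drop]
          omega
        have hdrop' : (pvWriteI labels i L).drop (i + L)
            = List.replicate (low.length - (i + L)) "O" := by
          rw [hw', List.drop_left' hpre]
          have hdd : labels.drop (i + L) = (labels.drop i).drop L := by
            rw [List.drop_drop]
          rw [hdd, hdrop, List.drop_replicate]
          congr 1
          omega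
        have htake' : (pvWriteI labels i L).take (i + L)
            = labels.take i ++ "B-STYLE" :: List.replicate (L - 1) "I-STYLE" := by
          rw [hw']
          exact List.take_left' hpre
        rw [ih (i + L) _ (by omega) hlen' hdrop']
        rw [htake']
        have hacc := pvLoopB_acc low S M low.length (low.length - (i + L)) (i + L)
          ([] ++ "B-STYLE" :: List.replicate (L - 1) "I-STYLE") le_rfl
        rw [hacc]
        simp
    · rw [pvLoopA_stop norm low low.length labels i hi,
          pvLoopB_stop low S M low.length [] i hi,
          List.take_of_length_le (by omega)]
      simp

-- ===== VERDICT (by name: the statement is the Claim_ definition above) =====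
theorem tag_with_lexicon_spec : Claim_equal_tag_with_lexicon := by
  unfold Claim_equal_tag_with_lexicon
  intro tokens style_terms _hdom
  unfold Spec_tag_with_lexicon tag_with_lexicon tag_with_lexicon_alt
  have hlow : (tokens.map (fun t => PySem.Str.lower t)).length = tokens.length := by
    simp
  rw [← hlow]
  rw [pvLoopA_eq (pvNormA style_terms) (tokens.map (fun t => PySem.Str.lower t))
      (pvPhrases style_terms)
      (PySem.List.maxD ((pvPhrases style_terms).map (fun p => p.length)) (fun x => x) 0)
      (fun i => pvScan_eq _ style_terms i)
      (tokens.map (fun t => PySem.Str.lower t)).length 0 _ (by omega)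
      (by simp) (by simp)]
  simp
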